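-- pv_equiv track=rewrite | github.com/MuhamadZaki/Logika_Python | main.py | find_triple_linked_words
-- ===== SOURCE A (Python) =====
-- def find_triple_linked_words(words):
--     # Inisialisasi daftar kosong untuk menyimpan kata-kata yang ditemukan
--     result = []
--
--     # Membuat set kata untuk pencarian yang lebih efisien
--     word_set = set(words)
--
--     # Iterasi melalui setiap kata dalam daftar kata yang diberikan
--     for word1 in words:
--         # Iterasi melalui setiap indeks dalam panjang kata saat ini
--         for i in range(len(word1)):
--             # Iterasi melalui setiap kata dalam daftar kata yang diberikan
--             for word2 in words:
--                 # Memeriksa apakah kata kedua tidak sama dengan kata pertama dan panjangnya lebih besar dari indeks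
--                 if word2 != word1 and len(word2) > i:
--                     # Membuat kata baru dengan menggabungkan bagian-bagian dari kata pertama dan kedua
--                     new_word = word1[:i] + word2[i] + word1[i+1:]
--                     # Memeriksa apakah kata baru ada di dalam set kata
--                     if new_word in word_set:
--                         # Jika ya, tambahkan triple kata yang saling bertautan ke dalam daftar hasil
--                         result.append((word1, word2, new_word))
--
--     # Mengembalikan daftar kata-kata yang saling bertautan tiga arah
--     return result
-- ===== SOURCE B (Python) =====
-- def find_triple_linked_words(words):
--     # Precompute once: at[i] = the words longer than i, each paired with its char at
--     # position i, in list order; chs[i] = the distinct chars at position i.  Per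
--     # (word1, i) build a dict mapping each candidate char to the substituted word when
--     # it exists; the scan over word2 is then a single O(1) dict lookup.
--     word_set = set(words)
--     maxlen = 0
--     for w in words:
--         if len(w) > maxlen:
--             maxlen = len(w)
--     at = [[(w, w[i]) for w in words if len(w) > i] for i in range(maxlen)]
--     chs = [list(dict.fromkeys(c for _, c in at[i])) for i in range(maxlen)]
--     result = []
--     for word1 in words:
--         for i in range(len(word1)):
--             prefix, suffix = word1[:i], word1[i + 1:]
--             valid = {}
--             for c in chs[i]:
--                 nw = prefix + c + suffix
--                 if nw in word_set:
--                     valid[c] = nw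
--             for w2, c in at[i]:
--                 if w2 != word1:
--                     nw = valid.get(c)
--                     if nw is not None:
--                         result.append((word1, w2, nw))
--     return result
-- ===== Notes on version B (the rewrite author's own statement) =====
-- stated objective: faster
-- what changed: B precomputes once a (position, char) index at[i] of the words paired with their char at i plus the distinct chars per position, and per (word1,i) builds a dict from candidate chars to the substituted word, so the inner scan over word2 does an O(1) dict lookup instead of rebuilding and hash-testing an O(L) string per (word1,i,word2) pair; intended as faster, measured 3.09x at n=1024 on the random family, unconfirmed on the sorted family where both programs time out producing the quadratic-size output.
import Mathlib
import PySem

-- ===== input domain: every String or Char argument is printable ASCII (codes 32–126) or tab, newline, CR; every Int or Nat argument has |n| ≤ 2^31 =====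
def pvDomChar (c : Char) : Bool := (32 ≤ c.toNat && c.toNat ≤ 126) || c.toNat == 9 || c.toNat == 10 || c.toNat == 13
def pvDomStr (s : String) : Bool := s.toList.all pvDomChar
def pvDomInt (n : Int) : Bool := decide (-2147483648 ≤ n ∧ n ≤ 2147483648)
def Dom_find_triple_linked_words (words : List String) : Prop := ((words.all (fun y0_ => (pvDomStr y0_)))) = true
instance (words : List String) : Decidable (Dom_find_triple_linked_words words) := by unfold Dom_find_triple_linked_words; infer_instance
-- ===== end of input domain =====

-- B precomputes a (position, char) index and a per-(word1,i) substitution dict, replacing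
-- A's per-(word1,i,word2) string rebuild + set test by a dict lookup; intended as faster
-- (timing run measured 3.09x at n=1024 on random inputs; unconfirmed on the sorted family).


-- ===== PORT A =====
-- 'word1[:i] + word2[i] + word1[i+1:]': Python string concatenation, exact as list append on code points
def pvCat3 (pre : String) (c : Char) (suf : String) : String :=
  String.ofList (pre.toList ++ c :: suf.toList)

def find_triple_linked_words (words : List String) : List (String × String × String) :=
  let word_set : PySem.Set String := PySem.Set.ofList words
  words.foldl (fun result word1 =>
    (PySem.List.pyRange 0 (PySem.Str.len word1) 1).foldl (fun result i =>
      words.foldl (fun result word2 =>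
        if word2 ≠ word1 ∧ i < PySem.Str.len word2 then
          match PySem.Str.pyGet? word2 i with
          | some c =>
            let new_word := pvCat3 (PySem.Str.slice word1 none (some i)) c
                              (PySem.Str.slice word1 (some (i + 1)) none)
            if PySem.Set.contains word_set new_word then result ++ [(word1, word2, new_word)]
            else result
          | none => result  -- unreachable: the guard ensures 0 ≤ i < len(word2)
        else result) result) result) []

-- ===== PORT B =====
def find_triple_linked_words_alt (words : List String) : List (String × String × String) :=
  let word_set : PySem.Set String := PySem.Set.ofList words
  let maxlen : Int := words.foldl (fun m w => if PySem.Str.len w > m then PySem.Str.len w else m) 0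
  -- at[i] = [(w, w[i]) for w in words if len(w) > i]; w[i] always exists under the filter,
  -- so the Option returned by pyGet? is some there (filterMap keeps exactly those)
  let atTbl := (PySem.List.pyRange 0 maxlen 1).map (fun i =>
    (words.filter (fun w => i < PySem.Str.len w)).filterMap
      (fun w => (PySem.Str.pyGet? w i).map (fun c => (w, c))))
  -- chs[i] = list(dict.fromkeys(c for _, c in at[i]))
  let chs := (PySem.List.pyRange 0 maxlen 1).map (fun i =>
    PySem.List.dedup ((PySem.List.pyGetD atTbl i []).map (fun p => p.2)))
  words.foldl (fun result word1 =>
    (PySem.List.pyRange 0 (PySem.Str.len word1) 1).foldl (fun result i =>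
      -- i < len(word1) ≤ maxlen, so the chs[i] / at[i] accesses are in range (default never read)
      let prefix_ := PySem.Str.slice word1 none (some i)
      let suffix_ := PySem.Str.slice word1 (some (i + 1)) none
      let valid : PySem.Dict Char String := (PySem.List.pyGetD chs i []).foldl (fun d c =>
        let nw := pvCat3 prefix_ c suffix_
        if PySem.Set.contains word_set nw then d.insert c nw else d) PySem.Dict.empty
      (PySem.List.pyGetD atTbl i []).foldl (fun result wc =>
        if wc.1 ≠ word1 then
          match valid.get? wc.2 with
          | some nw => result ++ [(word1, wc.1, nw)]
          | none => result
        else result) result) result) []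

-- ===== PRECONDITION & SPEC =====
def Spec_find_triple_linked_words (words : List String) (out : List (String × String × String)) : Prop := out = find_triple_linked_words_alt words
instance (words : List String) (out : List (String × String × String)) : Decidable (Spec_find_triple_linked_words words out) := by unfold Spec_find_triple_linked_words; infer_instance

-- ===== CLAIM (what is proved, stated in full; the proofs are below) =====
def Claim_equal_find_triple_linked_words : Prop := ∀ (words : List String), Dom_find_triple_linked_words words → Spec_find_triple_linked_words words (find_triple_linked_words words)

-- ===== LEMMAS AND PROOFS =====

-- B's maxlen fold dominates the accumulator and every word length
theorem pv_foldl_max_ge_acc (l : List String) (acc : Int) :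
    acc ≤ l.foldl (fun m w => if PySem.Str.len w > m then PySem.Str.len w else m) acc := by
  induction l generalizing acc with
  | nil => simp
  | cons x l ih =>
    refine le_trans ?_ (ih _)
    dsimp only
    split_ifs with h <;> omega

theorem pv_le_maxlen (l : List String) (w : String) (hw : w ∈ l) (acc : Int) :
    PySem.Str.len w ≤ l.foldl (fun m w => if PySem.Str.len w > m then PySem.Str.len w else m) acc := by
  induction l generalizing acc with
  | nil => cases hw
  | cons x l ih =>
    rcases List.mem_cons.1 hw with rfl | hw'
    · refine le_trans ?_ (pv_foldl_max_ge_acc l _)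
      dsimp only
      split_ifs with h <;> omega
    · exact ih hw' _

-- reading B's precomputed per-position table at an in-range index
theorem pv_getD_map_pyRange {α : Type} (g : Int → α) (m i : Int) (d : α)
    (h0 : 0 ≤ i) (hm : i < m) :
    PySem.List.pyGetD ((PySem.List.pyRange 0 m 1).map g) i d = g i := by
  have hl : i < (((PySem.List.pyRange 0 m 1).map g).length : Int) := by
    simp [PySem.List.length_pyRange_one]
    omega
  rw [PySem.List.pyGetD_eq_getElem _ d h0 hl]
  rw [List.getElem_map]
  rw [PySem.List.getElem_pyRange_one]
  congr 1
  omega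

-- The dict built by B's char loop, read at a key in the list: inserted value depends only on the key.
theorem pv_fold_get (P : Char → Bool) (f : Char → String) (cs : List Char)
    (d0 : PySem.Dict Char String) (c : Char) :
    ((cs.foldl (fun d c => if P c then d.insert c (f c) else d) d0).get? c)
      = if P c ∧ c ∈ cs then some (f c) else d0.get? c := by
  induction cs generalizing d0 with
  | nil => simp
  | cons x cs ih =>
    simp only [List.foldl_cons]
    rw [ih]
    have hstep : ∀ (hxc : c ≠ x),
        (if P x = true then d0.insert x (f x) else d0).get? c = d0.get? c := by
      intro hxc
      split_ifs with h
      · rw [PySem.Dict.get?_insert]; simp [hxc]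
      · rfl
    by_cases hxc : c = x
    · subst hxc
      by_cases hP : P c = true
      · simp [hP, PySem.Dict.get?_insert_self]
      · simp [hP]
    · by_cases hP : P c = true
      · by_cases hmem : c ∈ cs
        · simp [hP, hmem]
        · simp [hP, hmem, hxc, hstep hxc]
      · simp [hP, hstep hxc]

-- A's guarded scan over words = B's scan over the precomputed (word, char) pairs at position i,
-- provided the lookup function F agrees with the test G on every char at position i of a scanned word.
theorem pv_inner (word1 : String) (i : Int) (hi0 : 0 ≤ i)
    (F : Char → Option String) (G : Char → Bool) (f : Char → String)
    (ws : List String) (acc : List (String × String × String))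
    (hF : ∀ w2 ∈ ws, ∀ c, PySem.Str.pyGet? w2 i = some c →
      F c = if G c then some (f c) else none) :
    ws.foldl (fun result word2 =>
        if word2 ≠ word1 ∧ i < PySem.Str.len word2 then
          match PySem.Str.pyGet? word2 i with
          | some c => if G c then result ++ [(word1, word2, f c)] else result
          | none => result
        else result) acc
      = ((ws.filter (fun w => i < PySem.Str.len w)).filterMap
          (fun w => (PySem.Str.pyGet? w i).map (fun c => (w, c)))).foldl
        (fun result wc =>
          if wc.1 ≠ word1 then
            match F wc.2 with
            | some nw => result ++ [(word1, wc.1, nw)]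
            | none => result
          else result) acc := by
  induction ws generalizing acc with
  | nil => rfl
  | cons w ws ih =>
    have ihtail := fun acc => ih acc (fun w2 hw2 c hc => hF w2 (List.mem_cons_of_mem w hw2) c hc)
    by_cases hlen : i < PySem.Str.len w
    · have hlt : i.toNat < w.toList.length := by
        have : i < (w.toList.length : Int) := by simpa [PySem.Str.len] using hlen
        omega
      have hget : PySem.Str.pyGet? w i = some (w.toList[i.toNat]) := by
        conv_lhs => rw [show i = ((i.toNat : Nat) : Int) by omega]
        rw [PySem.Str.pyGet?_natCast]
        simp [List.getElem?_eq_getElem hlt]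
      have hFw := hF w (List.mem_cons_self) (w.toList[i.toNat]) hget
      simp only [List.foldl_cons, List.filter_cons, hlen, decide_true, if_true,
        List.filterMap_cons, hget, Option.map_some, List.foldl_cons]
      by_cases hne : w ≠ word1
      · simp only [hne, and_true, if_true, ne_eq, not_false_iff, hFw]
        by_cases hG : G (w.toList[i.toNat]) = true
        · simp only [hG, if_true]
          exact ihtail _
        · simp only [hG, Bool.false_eq_true, if_false]
          exact ihtail _
      · simp only [ne_eq, not_not] at hne
        simp only [hne, ne_eq, not_true_eq_false, false_and, if_false]
        exact ihtail _
    · simp only [List.foldl_cons, List.filter_cons, hlen, decide_false, if_false,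
        Bool.false_eq_true]
      rw [if_neg (by tauto)]
      exact ihtail _

-- ===== VERDICT (by name: the statement is the Claim_ definition above) =====
theorem find_triple_linked_words_spec : Claim_equal_find_triple_linked_words := by
  intro words _
  show find_triple_linked_words words = find_triple_linked_words_alt words
  unfold find_triple_linked_words find_triple_linked_words_alt
  apply PySem.List.foldl_congr_mem
  intro acc1 word1 hw1
  apply PySem.List.foldl_congr_mem
  intro acc2 i hi
  obtain ⟨hi0, hilt⟩ := PySem.List.mem_pyRange_one.1 hi
  have himax : i < words.foldl (fun m w => if PySem.Str.len w > m then PySem.Str.len w else m) 0 :=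
    lt_of_lt_of_le hilt (pv_le_maxlen words word1 hw1 0)
  simp only [pv_getD_map_pyRange _ _ _ _ hi0 himax]
  have hF : ∀ w2 ∈ words, ∀ c, PySem.Str.pyGet? w2 i = some c →
      (List.foldl (fun d c =>
          if (PySem.Set.ofList words).contains
              (pvCat3 (PySem.Str.slice word1 none (some i)) c (PySem.Str.slice word1 (some (i + 1)) none)) = true
          then d.insert c (pvCat3 (PySem.Str.slice word1 none (some i)) c (PySem.Str.slice word1 (some (i + 1)) none))
          else d)
        PySem.Dict.empty
        (PySem.List.dedup (List.map (fun p => p.2)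
          (List.filterMap (fun w => Option.map (fun c => (w, c)) (PySem.Str.pyGet? w i))
            (List.filter (fun w => decide (i < PySem.Str.len w)) words))))).get? c
      = if (PySem.Set.ofList words).contains
            (pvCat3 (PySem.Str.slice word1 none (some i)) c (PySem.Str.slice word1 (some (i + 1)) none)) = true
        then some (pvCat3 (PySem.Str.slice word1 none (some i)) c (PySem.Str.slice word1 (some (i + 1)) none))
        else none := by
    intro w2 hw2 c hc
    have hlt : i.toNat < w2.toList.length ∧ w2.toList[i.toNat]? = some c := by
      have hc' : PySem.Str.pyGet? w2 ((i.toNat : Nat) : Int) = some c := by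
        conv_lhs => rw [show ((i.toNat : Nat) : Int) = i by omega]
        exact hc
      rw [PySem.Str.pyGet?_natCast] at hc'
      exact ⟨(List.getElem?_eq_some_iff.1 hc').1, hc'⟩
    have hw2len : i < PySem.Str.len w2 := by
      have h1 : i < (w2.toList.length : Int) := by
        have := hlt.1
        omega
      simpa [PySem.Str.len] using h1
    have hcm : c ∈ PySem.List.dedup (List.map (fun p => p.2)
        (List.filterMap (fun w => Option.map (fun c => (w, c)) (PySem.Str.pyGet? w i))
          (List.filter (fun w => decide (i < PySem.Str.len w)) words))) := by
      rw [PySem.List.mem_dedup]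
      refine List.mem_map.2 ⟨(w2, c), ?_, rfl⟩
      refine List.mem_filterMap.2 ⟨w2, List.mem_filter.2 ⟨hw2, by simpa using hw2len⟩, ?_⟩
      rw [hc]; rfl
    rw [pv_fold_get]
    by_cases hP : (PySem.Set.ofList words).contains
        (pvCat3 (PySem.Str.slice word1 none (some i)) c (PySem.Str.slice word1 (some (i + 1)) none)) = true
    · simp at hcm hP ⊢
      simp [hP, hcm]
    · simp at hcm hP ⊢
      simp [hP, hcm]
  exact pv_inner word1 i hi0 _ _ _ words acc2 hF
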